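-- pv_equiv track=rewrite | github.com/RRayo/CC5114-Redes-Neuronales | trees/tools.py | copy_tree
-- ===== SOURCE A (Python) =====
-- def copy_tree(tree, nodo):
--     arbol_final = []
--     pila_nodos = [nodo]
--     while pila_nodos:
--         nodo_actual = pila_nodos.pop()
--         arbol_final.append(tree[nodo_actual])
--
--         nodo_izq = 2 * nodo_actual + 1
--         nodo_der = 2 * nodo_actual + 2
--
--         if nodo_izq < len(tree):
--             pila_nodos.insert(0, nodo_izq)
--         if nodo_der < len(tree):
--             pila_nodos.insert(0, nodo_der)
--
--     return arbol_final
-- ===== SOURCE B (Python) =====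
-- def copy_tree(tree, nodo):
--     # Level-by-level: the subtree of `nodo` occupies the index range
--     # [lo, hi) at each depth (clipped to len(tree)); children of the
--     # range [lo, cut) are exactly [2*lo+1, 2*cut+1).
--     n = len(tree)
--     out = []
--     lo, hi = nodo, nodo + 1
--     while lo < n:
--         cut = min(hi, n)
--         out.extend(tree[lo:cut])
--         lo, hi = 2 * lo + 1, 2 * cut + 1
--     return out
-- ===== Notes on version B (the rewrite author's own statement) =====
-- stated objective: alternative
-- what changed: B replaces A's node-by-node FIFO queue traversal by a level-range sweep: the subtree occupies one contiguous index interval per depth, so B slices tree[lo:min(hi,n)] per level and doubles the interval bounds, removing the queue entirely.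
import Mathlib
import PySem

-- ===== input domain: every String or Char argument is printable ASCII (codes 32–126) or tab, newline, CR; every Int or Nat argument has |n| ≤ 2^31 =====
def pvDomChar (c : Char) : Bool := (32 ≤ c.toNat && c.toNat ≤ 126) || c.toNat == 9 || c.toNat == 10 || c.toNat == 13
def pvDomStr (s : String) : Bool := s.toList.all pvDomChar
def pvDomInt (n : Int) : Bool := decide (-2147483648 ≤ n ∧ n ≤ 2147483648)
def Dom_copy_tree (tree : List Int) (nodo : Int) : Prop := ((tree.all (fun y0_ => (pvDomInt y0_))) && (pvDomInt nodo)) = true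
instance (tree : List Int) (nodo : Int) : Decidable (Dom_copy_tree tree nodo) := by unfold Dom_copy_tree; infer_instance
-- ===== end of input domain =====

-- B replaces A's FIFO queue by a per-depth contiguous index-interval sweep (alternative algorithm, no queue).

-- ===== PORT A =====
-- A's while-loop over the queue, as fuel recursion; the fuel tree.length + 1 is proved
-- sufficient on Pre_ (each queue pop is a distinct index < tree.length), so `none`
-- (exhaustion or an out-of-range tree[nodo_actual], Python's IndexError/divergence)
-- occurs only outside Pre_.
def copyLoopA (tree : List Int) : Nat → List Int → List Int → Option (List Int)
  | 0, _, _ => none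
  | fuel + 1, pila, acc =>
    match PySem.List.pop? pila with
    | none => some acc                                  -- while pila_nodos: exits
    | some (nodo_actual, pila1) =>
      match PySem.List.pyGet? tree nodo_actual with     -- tree[nodo_actual]
      | none => none                                    -- IndexError
      | some v =>
        let izq := 2 * nodo_actual + 1
        let der := 2 * nodo_actual + 2
        let pila2 := if izq < (tree.length : Int) then PySem.List.insert pila1 0 izq else pila1
        let pila3 := if der < (tree.length : Int) then PySem.List.insert pila2 0 der else pila2
        copyLoopA tree fuel pila3 (acc ++ [v])

def copy_tree (tree : List Int) (nodo : Int) : List Int :=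
  (copyLoopA tree (tree.length + 1) [nodo] []).getD []

-- ===== PORT B =====
-- B's while-loop over (lo, hi), as fuel recursion; lo strictly increases while
-- 0 ≤ lo < tree.length, so the fuel tree.length + 1 is proved sufficient on Pre_.
def copyLoopB (tree : List Int) : Nat → Int → Int → List Int → List Int
  | 0, _, _, out => out
  | fuel + 1, lo, hi, out =>
    if lo < (tree.length : Int) then
      let cut := min hi (tree.length : Int)
      copyLoopB tree fuel (2 * lo + 1) (2 * cut + 1)
        (out ++ PySem.List.slice tree (some lo) (some cut))
    else out

def copy_tree_alt (tree : List Int) (nodo : Int) : List Int :=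
  copyLoopB tree (tree.length + 1) nodo (nodo + 1) []

-- ===== PRECONDITION & SPEC =====
-- Pre_ is exactly where Python A returns: for nodo ≥ len(tree) (or nodo < -len) A raises
-- IndexError, and for -len ≤ nodo < 0 A's queue re-enqueues negative indices forever.
def Pre_copy_tree (tree : List Int) (nodo : Int) : Prop :=
  0 ≤ nodo ∧ nodo < (tree.length : Int)
instance (tree : List Int) (nodo : Int) : Decidable (Pre_copy_tree tree nodo) := by
  unfold Pre_copy_tree; infer_instance

def pvWitness_copy_tree : List Int × Int := ([5, 3], 0)

def Spec_copy_tree (tree : List Int) (nodo : Int) (out : List Int) : Prop := out = copy_tree_alt tree nodo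
instance (tree : List Int) (nodo : Int) (out : List Int) : Decidable (Spec_copy_tree tree nodo out) := by unfold Spec_copy_tree; infer_instance

-- ===== CLAIM (what is proved, stated in full; the proofs are below) =====
def Claim_equal_copy_tree : Prop := ∀ (tree : List Int) (nodo : Int), Dom_copy_tree tree nodo → Pre_copy_tree tree nodo → Spec_copy_tree tree nodo (copy_tree tree nodo)

-- ===== LEMMAS AND PROOFS =====

-- The level sweep as a well-founded (fuel-free) recursion; both loops are reduced to it.
def refB (tree : List Int) (lo hi : Int) : List Int :=
  if _h : 0 ≤ lo ∧ lo < (tree.length : Int) then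
    PySem.List.slice tree (some lo) (some (min hi (tree.length : Int))) ++
      refB tree (2 * lo + 1) (2 * min hi (tree.length : Int) + 1)
  else []
termination_by ((tree.length : Int) - lo).toNat
decreasing_by omega

theorem loopB_eq_refB (tree : List Int) :
    ∀ (fuel : Nat) (lo hi : Int) (out : List Int), 0 ≤ lo →
      ((tree.length : Int) - lo).toNat < fuel →
      copyLoopB tree fuel lo hi out = out ++ refB tree lo hi := by
  intro fuel
  induction fuel with
  | zero => intro lo hi out _ h; omega
  | succ fuel ih =>
    intro lo hi out hlo hf
    rw [copyLoopB, refB]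
    by_cases hlt : lo < (tree.length : Int)
    · rw [if_pos hlt, dif_pos ⟨hlo, hlt⟩, ih _ _ _ (by omega) (by omega), List.append_assoc]
    · rw [if_neg hlt, dif_neg (by omega), List.append_nil]

theorem slice_of_le (tree : List Int) (a c : Int) (ha : 0 ≤ a) (hc : 0 ≤ c) (h : c ≤ a) :
    PySem.List.slice tree (some a) (some c) = [] := by
  rw [PySem.List.slice_toNat tree ha hc]
  have : c.toNat - a.toNat = 0 := by omega
  simp [this]

theorem refB_empty (tree : List Int) :
    ∀ (lo hi : Int), 0 ≤ lo → 0 ≤ hi → min hi (tree.length : Int) ≤ lo →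
      refB tree lo hi = [] := by
  intro lo hi hlo hhi hle
  rw [refB]
  by_cases hg : 0 ≤ lo ∧ lo < (tree.length : Int)
  · rw [dif_pos hg]
    have h1 : PySem.List.slice tree (some lo) (some (min hi (tree.length : Int))) = [] :=
      slice_of_le tree lo _ hlo (by omega) hle
    have h2 : refB tree (2 * lo + 1) (2 * min hi (tree.length : Int) + 1) = [] :=
      refB_empty tree (2 * lo + 1) (2 * min hi (tree.length : Int) + 1)
        (by omega) (by omega) (by omega)
    rw [h1, h2, List.append_nil]
  · rw [dif_neg hg]
termination_by lo hi _ _ _ => ((tree.length : Int) - lo).toNat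
decreasing_by omega

theorem length_slice_of_bounds (tree : List Int) (a c : Int) (ha : 0 ≤ a) (hac : a ≤ c)
    (hc : c ≤ (tree.length : Int)) :
    (PySem.List.slice tree (some a) (some c)).length = (c - a).toNat := by
  rw [PySem.List.slice_toNat tree ha (by omega)]
  simp [List.length_take, List.length_drop]
  omega

theorem refB_length_le (tree : List Int) :
    ∀ (lo hi : Int), 0 ≤ lo → 0 ≤ hi → hi ≤ 2 * lo + 1 →
      (refB tree lo hi).length ≤ ((tree.length : Int) - lo).toNat := by
  intro lo hi hlo hhi hdom
  rw [refB]
  by_cases hg : 0 ≤ lo ∧ lo < (tree.length : Int)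
  · rw [dif_pos hg]
    have hrec := refB_length_le tree (2 * lo + 1) (2 * min hi (tree.length : Int) + 1)
      (by omega) (by omega) (by omega)
    rw [List.length_append]
    by_cases hac : lo ≤ min hi (tree.length : Int)
    · rw [length_slice_of_bounds tree lo _ hlo hac (by omega)]
      omega
    · rw [slice_of_le tree lo _ hlo (by omega) (by omega)]
      simp only [List.length_nil]
      omega
  · simp [dif_neg hg]
termination_by lo hi _ _ _ => ((tree.length : Int) - lo).toNat
decreasing_by omega

theorem insert_zero_eq_cons (xs : List Int) (v : Int) :
    PySem.List.insert xs 0 v = v :: xs := by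
  simp [PySem.List.insert, PySem.List.sliceIndices]

theorem slice_cons_of_lt (tree : List Int) (a c : Int) (ha : 0 ≤ a) (hac : a < c)
    (hc : c ≤ (tree.length : Int)) :
    PySem.List.slice tree (some a) (some c) =
      tree[a.toNat]'(by omega) :: PySem.List.slice tree (some (a + 1)) (some c) := by
  rw [PySem.List.slice_toNat tree ha (by omega), PySem.List.slice_toNat tree (by omega) (by omega)]
  rw [List.drop_eq_getElem_cons (by omega)]
  have h1 : c.toNat - a.toNat = (c.toNat - (a + 1).toNat) + 1 := by omega
  have h2 : (a + 1).toNat = a.toNat + 1 := by omega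
  rw [h1, h2, List.take_succ_cons]

-- Pushing the (in-range) children of a extends the next-level prefix by one parent.
theorem range_push (l a n : Int) (hl : l ≤ 2 * a + 1) :
    PySem.List.pyRange l (min (2 * a + 3) n) =
      PySem.List.pyRange l (min (2 * a + 1) n) ++
        (if 2 * a + 1 < n then [2 * a + 1] else []) ++
        (if 2 * a + 2 < n then [2 * a + 2] else []) := by
  by_cases h1 : n ≤ 2 * a + 1
  · rw [if_neg (by omega), if_neg (by omega)]
    have e1 : min (2 * a + 3) n = n := by omega
    have e2 : min (2 * a + 1) n = n := by omega
    rw [e1, e2, List.append_nil, List.append_nil]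
  · by_cases h2 : n ≤ 2 * a + 2
    · rw [if_pos (by omega), if_neg (by omega)]
      have e1 : min (2 * a + 3) n = n := by omega
      have e2 : min (2 * a + 1) n = 2 * a + 1 := by omega
      have e3 : n = (2 * a + 1) + 1 := by omega
      rw [e1, e2, e3, PySem.List.pyRange_one_succ_right (by omega), List.append_nil]
    · rw [if_pos (by omega), if_pos (by omega)]
      have e1 : min (2 * a + 3) n = 2 * a + 3 := by omega
      have e2 : min (2 * a + 1) n = 2 * a + 1 := by omega
      have e3 : (2 : Int) * a + 3 = (2 * a + 2) + 1 := by omega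
      have e4 : (2 : Int) * a + 2 = (2 * a + 1) + 1 := by omega
      rw [e1, e2, e3, PySem.List.pyRange_one_succ_right (by omega), e4,
        PySem.List.pyRange_one_succ_right (by omega)]

-- The queue invariant: A's queue is (in pop order) a suffix [a, min hi n) of the current
-- level together with the already-pushed prefix [2*lvlLo+1, min (2*a+1) n) of the next level.
theorem loopA_eq (tree : List Int) :
    ∀ (M fuel : Nat) (lvlLo a hi : Int) (acc : List Int),
      0 ≤ lvlLo → lvlLo ≤ a → 0 ≤ hi → hi ≤ 2 * lvlLo + 1 →
      (a ≤ min hi (tree.length : Int) ∨ a = lvlLo) →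
      ((tree.length : Int) - lvlLo).toNat * (tree.length + 1)
        + (min hi (tree.length : Int) - a).toNat ≤ M →
      (min hi (tree.length : Int) - a).toNat
        + (refB tree (2 * lvlLo + 1) (2 * min hi (tree.length : Int) + 1)).length < fuel →
      copyLoopA tree fuel
        ((PySem.List.pyRange a (min hi (tree.length : Int)) ++
          PySem.List.pyRange (2 * lvlLo + 1) (min (2 * a + 1) (tree.length : Int))).reverse) acc
      = some (acc ++ PySem.List.slice tree (some a) (some (min hi (tree.length : Int))) ++
              refB tree (2 * lvlLo + 1) (2 * min hi (tree.length : Int) + 1)) := by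
  intro M
  induction M using Nat.strong_induction_on with
  | _ M IH =>
  intro fuel lvlLo a hi acc h0 hla hhi hdom hinv hM hfuel
  have hn0 : (0 : Int) ≤ (tree.length : Int) := by positivity
  have hc0 : (0 : Int) ≤ min hi (tree.length : Int) := by omega
  obtain ⟨fuel, rfl⟩ : ∃ f, fuel = f + 1 := ⟨fuel - 1, by omega⟩
  by_cases hac : a < min hi (tree.length : Int)
  · -- pop a from the end of the queue
    rw [PySem.List.pyRange_one_cons hac, List.cons_append, List.reverse_cons]
    rw [copyLoopA]
    simp only [PySem.List.pop?_last, PySem.List.pyGet?_eq_some_getElem tree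
      (i := a) (by omega) (by omega), insert_zero_eq_cons]
    have hq : ∀ (b : List Int),
        ((if 2 * a + 2 < (tree.length : Int) then
            (2 * a + 2) :: (if 2 * a + 1 < (tree.length : Int) then (2 * a + 1) :: b.reverse else b.reverse)
          else (if 2 * a + 1 < (tree.length : Int) then (2 * a + 1) :: b.reverse else b.reverse)))
          = (b ++ (if 2 * a + 1 < (tree.length : Int) then [2 * a + 1] else []) ++
              (if 2 * a + 2 < (tree.length : Int) then [2 * a + 2] else [])).reverse := by
      intro b
      split_ifs <;> simp [List.reverse_append]
    rw [hq, List.append_assoc (PySem.List.pyRange (a + 1) (min hi (tree.length : Int))),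
      List.append_assoc (PySem.List.pyRange (a + 1) (min hi (tree.length : Int))),
      ← range_push _ _ _ (by omega)]
    have hnext : min (2 * a + 3) (tree.length : Int) = min (2 * (a + 1) + 1) (tree.length : Int) := by
      omega
    rw [hnext]
    rw [IH (M - 1) (by omega) (fuel) lvlLo (a + 1) hi (acc ++ [tree[a.toNat]'(by omega)])
      h0 (by omega) hhi hdom (Or.inl (by omega)) (by omega) (by omega)]
    rw [slice_cons_of_lt tree a _ (by omega) hac (by omega)]
    simp [List.append_assoc]
  · -- first interval exhausted
    rw [PySem.List.pyRange_one_eq_nil (by omega), List.nil_append]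
    by_cases h2 : min (2 * a + 1) (tree.length : Int) ≤ 2 * lvlLo + 1
    · -- queue empty: the loop exits
      rw [PySem.List.pyRange_one_eq_nil (by omega)]
      rw [copyLoopA]
      simp only [List.reverse_nil, PySem.List.pop?]
      rw [slice_of_le tree a _ (by omega) (by omega) (by omega),
        refB_empty tree _ _ (by omega) (by omega) (by omega)]
      simp
    · -- level transition: a = lvlLo is impossible here, so a = min hi n
      have ha_c : a = min hi (tree.length : Int) := by omega
      have hlt : 2 * lvlLo + 1 < (tree.length : Int) := by omega
      have hq2 : min (2 * a + 1) (tree.length : Int)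
          = min (2 * (min hi (tree.length : Int)) + 1) (tree.length : Int) := by omega
      rw [hq2]
      have hIH := IH
        (((tree.length : Int) - (2 * lvlLo + 1)).toNat * (tree.length + 1)
          + (min (2 * min hi (tree.length : Int) + 1) (tree.length : Int) - (2 * lvlLo + 1)).toNat)
        (by
          have hk : ((tree.length : Int) - (2 * lvlLo + 1)).toNat + 1
              ≤ ((tree.length : Int) - lvlLo).toNat := by omega
          have hs : (min (2 * min hi (tree.length : Int) + 1) (tree.length : Int)
              - (2 * lvlLo + 1)).toNat ≤ tree.length := by omega
          have hmul : (((tree.length : Int) - (2 * lvlLo + 1)).toNat + 1) * (tree.length + 1)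
              ≤ ((tree.length : Int) - lvlLo).toNat * (tree.length + 1) :=
            Nat.mul_le_mul_right _ hk
          have hexp : (((tree.length : Int) - (2 * lvlLo + 1)).toNat + 1) * (tree.length + 1)
              = ((tree.length : Int) - (2 * lvlLo + 1)).toNat * (tree.length + 1)
                + (tree.length + 1) := by ring
          omega)
        (fuel + 1) (2 * lvlLo + 1) (2 * lvlLo + 1) (2 * min hi (tree.length : Int) + 1) acc
        (by omega) le_rfl (by omega) (by omega) (Or.inr rfl) (le_refl _) (by
          -- fuel: the old count equals the new count, by unfolding refB once
          rw [refB, dif_pos ⟨by omega, hlt⟩] at hfuel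
          rw [List.length_append, length_slice_of_bounds tree _ _ (by omega) (by omega)
            (by omega)] at hfuel
          omega)
      rw [PySem.List.pyRange_one_eq_nil (min_le_left _ _), List.append_nil] at hIH
      rw [hIH, slice_of_le tree a _ (by omega) (by omega) (by omega)]
      conv_rhs => rw [refB]
      rw [dif_pos (show (0:Int) ≤ 2 * lvlLo + 1 ∧ 2 * lvlLo + 1 < (tree.length : Int) from ⟨by omega, hlt⟩)]
      simp [List.append_assoc]

-- ===== VERDICT (by name: the statement is the Claim_ definition above) =====
theorem copy_tree_spec : Claim_equal_copy_tree := by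
  intro tree nodo _ hpre
  obtain ⟨h0, hlen⟩ := hpre
  unfold Spec_copy_tree copy_tree copy_tree_alt
  have hA := loopA_eq tree
    (((tree.length : Int) - nodo).toNat * (tree.length + 1)
      + (min (nodo + 1) (tree.length : Int) - nodo).toNat)
    (tree.length + 1) nodo nodo (nodo + 1) []
    h0 le_rfl (by omega) (by omega) (Or.inl (by omega)) le_rfl
    (by
      have := refB_length_le tree (2 * nodo + 1) (2 * min (nodo + 1) (tree.length : Int) + 1)
        (by omega) (by omega) (by omega)
      omega)
  have hmin : min (nodo + 1) (tree.length : Int) = nodo + 1 := by omega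
  rw [hmin, PySem.List.pyRange_one_eq_nil (min_le_left _ _), List.append_nil,
    PySem.List.pyRange_one_singleton, List.reverse_singleton] at hA
  rw [hA, loopB_eq_refB tree _ nodo (nodo + 1) [] h0 (by omega)]
  conv_rhs => rw [refB]
  rw [dif_pos (show (0:Int) ≤ nodo ∧ nodo < (tree.length : Int) from ⟨h0, hlen⟩), hmin]
  simp
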